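-- pv_equiv track=rewrite | github.com/josephcourtney/grobl | src/grobl/app/root_context.py | _root_opt_skip
-- ===== SOURCE A (Python) =====
-- def _root_opt_skip(flag: str) -> int:
--     if flag in ROOT_FLAGS_WITH_VALUES:
--         return 2
--     if flag in ROOT_FLAGS_NO_VALUES:
--         return 1
--     for prefix in ROOT_EQUALS_FORMS:
--         if flag.startswith(prefix):
--             return 1
--     return 0
--
-- ROOT_FLAGS_WITH_VALUES = {
--     "--log-level",
--     "--config",
--     "--format",
--     "--output",
--     "--summary",
--     "--summary-style",
--     "--summary-to",
--     "--summary-output",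
--     "--ignore-policy",
-- }
--
-- ROOT_FLAGS_NO_VALUES = {
--     "--copy",
--     "--ignore-defaults",
--     "--no-ignore-config",
--     "--no-ignore",
-- }
--
-- ROOT_EQUALS_FORMS = tuple(f"{flag}=" for flag in ROOT_FLAGS_WITH_VALUES)
-- ===== SOURCE B (Python) =====
-- ROOT_FLAGS_WITH_VALUES = {
--     "--log-level",
--     "--config",
--     "--format",
--     "--output",
--     "--summary",
--     "--summary-style",
--     "--summary-to",
--     "--summary-output",
--     "--ignore-policy",
-- }
--
-- ROOT_FLAGS_NO_VALUES = {
--     "--copy",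
--     "--ignore-defaults",
--     "--no-ignore-config",
--     "--no-ignore",
-- }
--
--
-- def _root_opt_skip(flag: str) -> int:
--     if flag in ROOT_FLAGS_WITH_VALUES:
--         return 2
--     if flag in ROOT_FLAGS_NO_VALUES:
--         return 1
--     i = flag.find("=")
--     return 1 if i >= 0 and flag[:i] in ROOT_FLAGS_WITH_VALUES else 0
-- ===== Notes on version B (the rewrite author's own statement) =====
-- stated objective: simpler
-- what changed: B replaces A's loop over the derived tuple of nine equals-suffixed prefixes with a single find of the first equals sign plus one membership test of the text before it.
import Mathlib
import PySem

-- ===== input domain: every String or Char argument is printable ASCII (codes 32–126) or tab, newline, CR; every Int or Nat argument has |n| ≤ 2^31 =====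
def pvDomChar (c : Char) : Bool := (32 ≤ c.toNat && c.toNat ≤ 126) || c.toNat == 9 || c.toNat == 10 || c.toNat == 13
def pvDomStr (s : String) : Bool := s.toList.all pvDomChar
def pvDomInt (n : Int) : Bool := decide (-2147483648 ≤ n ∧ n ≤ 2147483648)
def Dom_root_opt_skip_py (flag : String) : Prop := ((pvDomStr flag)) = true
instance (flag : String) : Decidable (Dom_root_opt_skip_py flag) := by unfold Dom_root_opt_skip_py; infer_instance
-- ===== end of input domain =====

-- B replaces A's prefix loop by one find of the first equals sign plus a single membership test (simpler).

-- ===== PORT A =====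
def pvWithValues : List String :=
  ["--log-level", "--config", "--format", "--output", "--summary",
   "--summary-style", "--summary-to", "--summary-output", "--ignore-policy"]

def pvNoValues : List String :=
  ["--copy", "--ignore-defaults", "--no-ignore-config", "--no-ignore"]

def pvEqualsForms : List String := pvWithValues.map (fun f => f ++ "=")

-- the 'for prefix in ROOT_EQUALS_FORMS' loop with its early return
def pvRootLoop (ps : List String) (flag : String) : Int :=
  match ps with
  | [] => 0
  | p :: rest => if PySem.Str.startswith flag p then 1 else pvRootLoop rest flag

def root_opt_skip_py (flag : String) : Int :=
  if flag ∈ pvWithValues then 2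
  else if flag ∈ pvNoValues then 1
  else pvRootLoop pvEqualsForms flag

-- ===== PORT B =====
def root_opt_skip_py_alt (flag : String) : Int :=
  if flag ∈ pvWithValues then 2
  else if flag ∈ pvNoValues then 1
  else
    let i := PySem.Str.find flag "="
    if 0 ≤ i ∧ PySem.Str.slice flag none (some i) ∈ pvWithValues then 1 else 0

-- ===== PRECONDITION & SPEC =====
def Spec_root_opt_skip_py (flag : String) (out : Int) : Prop := out = root_opt_skip_py_alt flag
instance (flag : String) (out : Int) : Decidable (Spec_root_opt_skip_py flag out) := by unfold Spec_root_opt_skip_py; infer_instance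

-- ===== CLAIM (what is proved, stated in full; the proofs are below) =====
def Claim_equal_root_opt_skip_py : Prop := ∀ (flag : String), Dom_root_opt_skip_py flag → Spec_root_opt_skip_py flag (root_opt_skip_py flag)

-- ===== LEMMAS AND PROOFS =====

-- A's per-prefix test characterised by the position of the FIRST '=' in s.
lemma pv_prefix_eq_iff (s w : List Char) (hw : '=' ∉ w) :
    (w ++ ['=']) <+: s ↔
      (0 ≤ PySem.Chars.find s ['='] ∧ s.take (PySem.Chars.find s ['=']).toNat = w) := by
  constructor
  · intro h
    obtain ⟨t, ht⟩ := h
    have h0 : 0 ≤ PySem.Chars.find s ['='] := by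
      rw [PySem.Chars.find_nonneg_iff]
      exact ⟨w, t, by simpa using ht⟩
    obtain ⟨hpre, hmin⟩ := PySem.Chars.find_spec h0
    refine ⟨h0, ?_⟩
    set n := (PySem.Chars.find s ['=']).toNat with hn
    obtain ⟨l', hl', -⟩ := List.cons_prefix_iff.mp hpre
    have hget : s[n]? = some '=' := by
      have := congrArg (·[0]?) hl'
      simpa [List.getElem?_drop] using this
    have hnw : n = w.length := by
      rcases lt_trichotomy n w.length with hlt | heq | hgt
      · exfalso
        apply hw
        rw [← ht, List.getElem?_append_left (l₂ := t) (by simp; omega),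
            List.getElem?_append_left hlt] at hget
        exact List.mem_of_getElem? hget
      · exact heq
      · exact absurd (hmin w.length hgt
          (by rw [← ht, List.append_assoc, List.drop_left]; exact ⟨t, rfl⟩)) (fun hc => hc)
    rw [hnw, ← ht, List.append_assoc, List.take_left]
  · rintro ⟨h0, htake⟩
    obtain ⟨hpre, -⟩ := PySem.Chars.find_spec h0
    obtain ⟨l', hl', -⟩ := List.cons_prefix_iff.mp hpre
    refine ⟨l', ?_⟩
    calc (w ++ ['=']) ++ l'
        = s.take (PySem.Chars.find s ['=']).toNat
            ++ s.drop (PySem.Chars.find s ['=']).toNat := by rw [htake, hl']; simp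
      _ = s := List.take_append_drop _ _

-- the loop returns 1 iff some prefix matches
lemma pvRootLoop_eq_any (ps : List String) (flag : String) :
    pvRootLoop ps flag = if ps.any (fun p => PySem.Str.startswith flag p) then 1 else 0 := by
  induction ps with
  | nil => rfl
  | cons p rest ih =>
    simp only [pvRootLoop, ih, List.any_cons, Bool.or_eq_true]
    by_cases h : PySem.Chars.startswith flag.toList p.toList = true
    · simp [h]
    · simp [h]

-- Str-level form of pv_prefix_eq_iff for one candidate flag f
lemma pv_startswith_iff (flag f : String) (hf : '=' ∉ f.toList) :
    PySem.Str.startswith flag (f ++ "=") = true ↔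
      (0 ≤ PySem.Str.find flag "=" ∧
        flag.toList.take (PySem.Str.find flag "=").toNat = f.toList) := by
  rw [PySem.Str.startswith_eq, PySem.Str.find_eq]
  have h2 : ("=" : String).toList = ['='] := by decide
  have h1 : (f ++ "=").toList = f.toList ++ ['='] := by
    rw [String.toList_append, h2]
  rw [h1, h2, PySem.Chars.startswith_iff, pv_prefix_eq_iff _ _ hf]

-- ===== VERDICT (by name: the statement is the Claim_ definition above) =====
theorem root_opt_skip_py_spec : Claim_equal_root_opt_skip_py := by
  intro flag _
  unfold Spec_root_opt_skip_py root_opt_skip_py root_opt_skip_py_alt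
  by_cases h1 : flag ∈ pvWithValues
  · simp [h1]
  by_cases h2 : flag ∈ pvNoValues
  · simp [h1, h2]
  simp only [h1, h2, if_false]
  rw [pvRootLoop_eq_any]
  have hw : ∀ f ∈ pvWithValues, '=' ∉ f.toList := by decide
  have key : pvEqualsForms.any (fun p => PySem.Str.startswith flag p) = true ↔
      (0 ≤ PySem.Str.find flag "=" ∧
        PySem.Str.slice flag none (some (PySem.Str.find flag "=")) ∈ pvWithValues) := by
    rw [pvEqualsForms, List.any_map, List.any_eq_true]
    constructor
    · rintro ⟨f, hfWV, hsw⟩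
      obtain ⟨h0, htk⟩ := (pv_startswith_iff flag f (hw f hfWV)).mp hsw
      refine ⟨h0, ?_⟩
      have hsl : PySem.Str.slice flag none (some (PySem.Str.find flag "=")) = f := by
        apply String.toList_inj.mp
        rw [PySem.Str.toList_slice, PySem.Chars.slice_eq_listSlice,
            PySem.List.slice_to _ h0, htk]
      rwa [hsl]
    · rintro ⟨h0, hmem⟩
      refine ⟨_, hmem, ?_⟩
      apply (pv_startswith_iff flag _ (hw _ hmem)).mpr
      refine ⟨h0, ?_⟩
      rw [PySem.Str.toList_slice, PySem.Chars.slice_eq_listSlice,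
          PySem.List.slice_to _ h0]
  by_cases hc : 0 ≤ PySem.Str.find flag "=" ∧
      PySem.Str.slice flag none (some (PySem.Str.find flag "=")) ∈ pvWithValues
  · rw [if_pos (key.mpr hc), if_pos hc]
  · rw [if_neg (fun h => hc (key.mp h)), if_neg hc]
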